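-- pv_equiv track=rewrite | github.com/PRKKILLER/Algorithm_Practice | Company-OA/Robinhood/RevNumberPairs.py | solution
-- ===== SOURCE A (Python) =====
-- from typing import List
-- from collections import defaultdict
--
-- def solution(arr: List[int]) -> int:
--     res = 0
--     dict = defaultdict(int)
--
--     for num in arr:
--         dict[num - rev(num)] += 1
--
--     for d in dict.items():
--         res += d[1] * (d[1] + 1) // 2
--
--     return res
--
-- def rev(num):
--     return int(str(num)[::-1])
-- ===== SOURCE B (Python) =====
-- from typing import List
--
-- def solution(arr: List[int]) -> int:
--     keys = sorted(num - rev(num) for num in arr)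
--     res = 0
--     run = 0
--     prev = None
--     for k in keys:
--         if prev == k:
--             run += 1
--         else:
--             res += run * (run + 1) // 2
--             run = 1
--         prev = k
--     res += run * (run + 1) // 2
--     return res
--
-- def rev(num):
--     return int(str(num)[::-1])
-- ===== Notes on version B (the rewrite author's own statement) =====
-- stated objective: alternative
-- what changed: Replaces the defaultdict grouping plus items() summation with sorting the list of keys num-rev(num) and a single scan that counts maximal runs of equal keys, adding c*(c+1)//2 when each run ends.
import Mathlib
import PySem

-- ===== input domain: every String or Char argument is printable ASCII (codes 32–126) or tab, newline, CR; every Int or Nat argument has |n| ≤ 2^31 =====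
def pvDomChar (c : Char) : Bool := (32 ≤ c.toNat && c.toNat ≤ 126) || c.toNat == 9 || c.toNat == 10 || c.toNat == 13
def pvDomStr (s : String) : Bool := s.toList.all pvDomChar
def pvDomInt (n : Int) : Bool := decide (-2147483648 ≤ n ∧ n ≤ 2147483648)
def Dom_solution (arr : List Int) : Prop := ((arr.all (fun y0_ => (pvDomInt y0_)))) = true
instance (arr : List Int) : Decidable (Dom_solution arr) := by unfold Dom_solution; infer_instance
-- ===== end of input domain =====

-- B replaces A's dict-grouping with sort-then-scan over maximal runs of equal keys (alternative algorithm, same results).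

-- ===== PORT A =====
-- rev(num) = int(str(num)[::-1]); none (ValueError, negative num) is excluded by Pre_, .getD 0 is never reached there
def solRev (num : Int) : Int :=
  (PySem.Int.ofChars? ((PySem.Int.toChars num).reverse)).getD 0

def solution (arr : List Int) : Int :=
  let d := arr.foldl (fun d num =>
    d.insert (num - solRev num) (d.getD (num - solRev num) 0 + 1)) PySem.Dict.empty
  d.items.foldl (fun res p => res + PySem.Int.floordiv (p.2 * (p.2 + 1)) 2) 0

-- ===== PORT B =====
def solAltStep (st : Int × Int × Option Int) (k : Int) : Int × Int × Option Int :=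
  if st.2.2 = some k then (st.1, st.2.1 + 1, some k)
  else (st.1 + PySem.Int.floordiv (st.2.1 * (st.2.1 + 1)) 2, 1, some k)

def solution_alt (arr : List Int) : Int :=
  let keys := PySem.List.sorted (arr.map (fun num => num - solRev num)) (fun x => x) false
  let st := keys.foldl solAltStep (0, 0, none)
  st.1 + PySem.Int.floordiv (st.2.1 * (st.2.1 + 1)) 2

-- ===== PRECONDITION & SPEC =====
-- rev raises ValueError on negative numbers (str(-3)[::-1] = '3-'), in A and in B alike
def Pre_solution (arr : List Int) : Prop := ∀ x ∈ arr, 0 ≤ x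
instance (arr : List Int) : Decidable (Pre_solution arr) := by unfold Pre_solution; infer_instance
def pvWitness_solution : List Int := [1, 10, 12, 21, 0]

def Spec_solution (arr : List Int) (out : Int) : Prop := out = solution_alt arr
instance (arr : List Int) (out : Int) : Decidable (Spec_solution arr out) := by unfold Spec_solution; infer_instance

-- ===== CLAIM (what is proved, stated in full; the proofs are below) =====
def Claim_equal_solution : Prop := ∀ (arr : List Int), Dom_solution arr → Pre_solution arr → Spec_solution arr (solution arr)

-- ===== LEMMAS AND PROOFS =====

-- the triangular term res += c*(c+1)//2
def solTri (c : Int) : Int := PySem.Int.floordiv (c * (c + 1)) 2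

-- both programs compute this: the sum of solTri(count k) over the distinct keys k
def solTotal (l : List Int) : Int := ∑ k ∈ l.toFinset, solTri ((l.count k : Int))

lemma sol_foldl_counter (arr : List Int) :
    arr.foldl (fun d num =>
        d.insert (num - solRev num) (d.getD (num - solRev num) 0 + 1)) PySem.Dict.empty
      = PySem.Dict.counter (arr.map (fun num => num - solRev num)) := by
  rw [← PySem.Dict.foldl_insert_getD_add_one_eq_counter, List.foldl_map]

lemma solution_eq_total (arr : List Int) :
    solution arr = solTotal (arr.map (fun num => num - solRev num)) := by
  unfold solution solTotal
  rw [sol_foldl_counter, PySem.List.foldl_add, PySem.Dict.items_counter]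
  set l := arr.map (fun num => num - solRev num) with hl
  rw [List.map_map]
  have hc : ((fun p : Int × Int => PySem.Int.floordiv (p.2 * (p.2 + 1)) 2)
      ∘ fun k => (k, (l.count k : Int))) = fun k => solTri ((l.count k : Int)) := rfl
  rw [hc, ← List.sum_toFinset _ (PySem.Set.nodup_ofList l), zero_add]
  apply Finset.sum_congr
  · apply Finset.ext; intro a
    simp [PySem.Set.mem_ofList]
  · intro k _; rfl

lemma sol_le_getLast {t : List Int} (h : t.Pairwise (· ≤ ·)) {m : Int}
    (hm : t.getLast? = some m) : ∀ x ∈ t, x ≤ m := by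
  have ht := List.dropLast_append_getLast? m hm
  intro x hx
  rw [← ht] at hx h
  rcases List.mem_append.mp hx with h1 | h1
  · exact (List.pairwise_append.mp h).2.2 x h1 m (by simp)
  · simp only [List.mem_singleton] at h1
    exact le_of_eq h1

-- run-scan state after a sorted, nonempty list ending in m
lemma solAlt_scan (s : List Int) (hs : s.Pairwise (· ≤ ·)) :
    ∀ m, s.getLast? = some m →
    s.foldl solAltStep (0, 0, none) =
      (∑ k ∈ s.toFinset.erase m, solTri ((s.count k : Int)), ((s.count m : Int)), some m) := by
  induction s using List.reverseRecOn with
  | nil => intro m hm; simp at hm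
  | append_singleton t x ih =>
    intro m hm
    rw [List.getLast?_concat] at hm
    have hmx : m = x := by injection hm with h; exact h.symm
    subst hmx
    rw [List.foldl_append]
    rcases eq_or_ne t [] with rfl | htne
    · simp [solAltStep, solTri, List.count_singleton]
    · obtain ⟨m', hm'⟩ := Option.isSome_iff_exists.mp (List.getLast?_isSome.mpr htne)
      have hpt : t.Pairwise (· ≤ ·) := (List.pairwise_append.mp hs).1
      have hle : ∀ x ∈ t, x ≤ m :=
        fun x hx => (List.pairwise_append.mp hs).2.2 x hx m (by simp)
      have hm'le : m' ≤ m := hle m' (List.mem_of_getLast? hm')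
      have hm'max : ∀ x ∈ t, x ≤ m' := sol_le_getLast hpt hm'
      rw [ih hpt m' hm']
      by_cases hkm : m' = m
      · subst hkm
        have hmem : m' ∈ t := List.mem_of_getLast? hm'
        simp only [List.foldl_cons, List.foldl_nil, solAltStep, if_true]
        refine Prod.ext ?_ (Prod.ext ?_ rfl)
        · dsimp only
          apply Finset.sum_congr
          · congr 1
            simp [List.toFinset_append, Finset.insert_eq_self.mpr (List.mem_toFinset.mpr hmem)]
          · intro a ha
            have hane : a ≠ m' := (Finset.mem_erase.mp ha).1
            simp [List.count_append, Ne.symm hane]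
        · dsimp only
          simp [List.count_append]
      · have hknotin : m ∉ t := fun hin => hkm (le_antisymm hm'le (hm'max m hin))
        simp only [List.foldl_cons, List.foldl_nil, solAltStep]
        rw [if_neg (by simpa using hkm)]
        refine Prod.ext ?_ (Prod.ext ?_ rfl)
        · dsimp only
          have h1 : (t ++ [m]).toFinset.erase m = t.toFinset := by
            ext a
            simp only [Finset.mem_erase, List.mem_toFinset, List.mem_append,
              List.mem_singleton]
            constructor
            · rintro ⟨hne, h | h⟩
              · exact h
              · exact absurd h hne
            · intro h
              exact ⟨fun he => hknotin (he ▸ h), Or.inl h⟩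
          rw [h1]
          have h2 : ∀ a ∈ t.toFinset,
              solTri (((t ++ [m]).count a : Int)) = solTri ((t.count a : Int)) := by
            intro a ha
            have hane : a ≠ m := fun h => hknotin (h ▸ List.mem_toFinset.mp ha)
            simp [List.count_append, Ne.symm hane]
          rw [Finset.sum_congr rfl h2,
            ← Finset.add_sum_erase t.toFinset _ (List.mem_toFinset.mpr (List.mem_of_getLast? hm'))]
          rw [add_comm]
          rfl
        · dsimp only
          simp [List.count_append, List.count_eq_zero.mpr hknotin]

-- the scan result over ANY sorted list is the sum over its distinct keys
lemma sol_scan_total (s : List Int) (hs : s.Pairwise (· ≤ ·)) :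
    (s.foldl solAltStep (0, 0, none)).1
      + PySem.Int.floordiv ((s.foldl solAltStep (0, 0, none)).2.1
          * ((s.foldl solAltStep (0, 0, none)).2.1 + 1)) 2
      = ∑ k ∈ s.toFinset, solTri ((s.count k : Int)) := by
  rcases eq_or_ne s [] with rfl | hne
  · simp [solTri]
  · obtain ⟨m, hm⟩ := Option.isSome_iff_exists.mp (List.getLast?_isSome.mpr hne)
    rw [solAlt_scan s hs m hm]
    simp only
    rw [← Finset.add_sum_erase s.toFinset _ (List.mem_toFinset.mpr (List.mem_of_getLast? hm))]
    show _ + solTri _ = _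
    ring

lemma solution_alt_eq_total (arr : List Int) :
    solution_alt arr = solTotal (arr.map (fun num => num - solRev num)) := by
  unfold solution_alt
  dsimp only
  set l := arr.map (fun num => num - solRev num) with hl
  set s := PySem.List.sorted l (fun x => x) false with hsdef
  have hperm : s.Perm l := PySem.List.sorted_perm l (fun x => x) false
  rw [sol_scan_total s (PySem.List.sorted_pairwise l (fun x => x))]
  unfold solTotal
  apply Finset.sum_congr
  · apply Finset.ext; intro a; simp [hperm.mem_iff]
  · intro k _
    rw [hperm.count_eq]

-- ===== VERDICT (by name: the statement is the Claim_ definition above) =====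
theorem solution_spec : Claim_equal_solution := by
  intro arr _ _
  unfold Spec_solution
  rw [solution_eq_total, solution_alt_eq_total]
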